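-- pv_equiv track=rewrite | github.com/lymanmcbride/challenges | alphabet_nums.py | change_nums
-- ===== SOURCE A (Python) =====
-- alphabet = ['a', 'b', 'c', 'd', 'e', 'f', 'g', 'h', 'i', 'j', 'k', 'l', 'm', 'n', 'o', 'p', 'q', 'r', 's', 't', 'u', 'v', 'w', 'x', 'y', 'z']
--
-- def change_nums(phrase):
--     final = ""
--     for character in phrase:
--         if character in alphabet:
--             for i, letter in enumerate(alphabet):
--                 if character == letter:
--                     ind = str(i+1)
--                     final += ind
--                 else:
--                     continue
--         else:
--             continue
--     return final
-- ===== SOURCE B (Python) =====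
-- def change_nums(phrase):
--     return "".join(str(ord(c) - 96) for c in phrase if 'a' <= c <= 'z')
-- ===== Notes on version B (the rewrite author's own statement) =====
-- stated objective: idiomatic
-- what changed: Replaces the inner enumerate-scan over the alphabet list with direct arithmetic (ord(c)-96) and builds the result with a single join of a generator instead of repeated string concatenation.
import Mathlib
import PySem

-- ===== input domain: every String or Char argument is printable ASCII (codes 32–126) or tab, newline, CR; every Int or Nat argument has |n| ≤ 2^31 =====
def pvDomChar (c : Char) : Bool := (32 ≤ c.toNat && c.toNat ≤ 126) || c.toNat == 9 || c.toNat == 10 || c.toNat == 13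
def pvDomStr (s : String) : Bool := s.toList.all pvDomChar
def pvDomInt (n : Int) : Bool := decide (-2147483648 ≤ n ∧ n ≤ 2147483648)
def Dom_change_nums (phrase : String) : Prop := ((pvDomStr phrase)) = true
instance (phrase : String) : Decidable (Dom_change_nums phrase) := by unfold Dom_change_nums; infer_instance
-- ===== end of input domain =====

-- B replaces A's inner scan of the alphabet list with direct arithmetic on the character code (idiomatic join-of-generator).

-- ===== PORT A =====
def alphabetA : List Char :=
  ['a','b','c','d','e','f','g','h','i','j','k','l','m','n','o','p','q','r','s','t','u','v','w','x','y','z']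

-- strings are handled as List Char (PySem convention); final += ind is acc ++ ind
def change_nums (phrase : String) : String :=
  String.mk (phrase.toList.foldl (fun final character =>
    if alphabetA.contains character then
      (PySem.List.enumerate alphabetA).foldl (fun final p =>
        if character == p.2 then final ++ PySem.Int.toChars (p.1 + 1) else final) final
    else final) [])

-- ===== PORT B =====
def change_nums_alt (phrase : String) : String :=
  String.mk (((phrase.toList.filter (fun c => 'a' ≤ c ∧ c ≤ 'z')).map
    (fun c => PySem.Int.toChars ((c.toNat : Int) - 96))).flatten)

-- ===== PRECONDITION & SPEC =====
def Spec_change_nums (phrase : String) (out : String) : Prop := out = change_nums_alt phrase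
instance (phrase : String) (out : String) : Decidable (Spec_change_nums phrase out) := by unfold Spec_change_nums; infer_instance

-- ===== CLAIM (what is proved, stated in full; the proofs are below) =====
def Claim_equal_change_nums : Prop := ∀ (phrase : String), Dom_change_nums phrase → Spec_change_nums phrase (change_nums phrase)

-- ===== LEMMAS AND PROOFS =====

-- the chunk a single character contributes
def chunkA (c : Char) : List Char :=
  if alphabetA.contains c then
    (PySem.List.enumerate alphabetA).foldl (fun acc p =>
      if c == p.2 then acc ++ PySem.Int.toChars (p.1 + 1) else acc) []
  else []

def chunkB (c : Char) : List Char :=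
  if 'a' ≤ c ∧ c ≤ 'z' then PySem.Int.toChars ((c.toNat : Int) - 96) else []

lemma innerA_shift (l : List (Int × Char)) (c : Char) (acc : List Char) :
    l.foldl (fun acc p => if c == p.2 then acc ++ PySem.Int.toChars (p.1 + 1) else acc) acc
      = acc ++ l.foldl (fun acc p => if c == p.2 then acc ++ PySem.Int.toChars (p.1 + 1) else acc) [] := by
  induction l generalizing acc with
  | nil => simp
  | cons p l ih =>
    simp only [List.foldl_cons]
    split_ifs with h
    · rw [ih (acc ++ _), ih (List.nil ++ _)]
      simp
    · rw [ih acc]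

lemma stepA_chunk (c : Char) (acc : List Char) :
    (if alphabetA.contains c then
      (PySem.List.enumerate alphabetA).foldl (fun acc p =>
        if c == p.2 then acc ++ PySem.Int.toChars (p.1 + 1) else acc) acc
     else acc) = acc ++ chunkA c := by
  unfold chunkA
  split_ifs with h
  · exact innerA_shift _ _ _
  · simp

lemma chunk_eq (c : Char) : chunkA c = chunkB c := by
  by_cases h : 'a' ≤ c ∧ c ≤ 'z'
  · have h97 : 97 ≤ c.toNat := h.1
    have h122 : c.toNat ≤ 122 := h.2
    have hofc : Char.ofNat c.toNat = c := Char.ofNat_toNat c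
    rw [← hofc]
    interval_cases (c.toNat) <;> decide
  · have hne : alphabetA.contains c = false := by
      by_contra hcon
      have hmem : c ∈ alphabetA := by
        simpa using List.contains_iff_mem.mp (by simpa using hcon)
      have := List.all_eq_true.mp (by decide : alphabetA.all (fun x => decide ('a' ≤ x ∧ x ≤ 'z')) = true) c hmem
      exact h (by simpa using this)
    unfold chunkA chunkB
    rw [if_neg (by simp only [hne]; simp), if_neg h]

lemma foldl_chunkA (l : List Char) (acc : List Char) :
    l.foldl (fun final character =>
      if alphabetA.contains character then
        (PySem.List.enumerate alphabetA).foldl (fun final p =>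
          if character == p.2 then final ++ PySem.Int.toChars (p.1 + 1) else final) final
      else final) acc = acc ++ (l.map chunkA).flatten := by
  induction l generalizing acc with
  | nil => simp
  | cons c l ih =>
    simp only [List.foldl_cons, List.map_cons, List.flatten_cons]
    rw [stepA_chunk, ih, List.append_assoc]

lemma flatten_chunkB (l : List Char) :
    (l.map chunkB).flatten
      = ((l.filter (fun c => 'a' ≤ c ∧ c ≤ 'z')).map
          (fun c => PySem.Int.toChars ((c.toNat : Int) - 96))).flatten := by
  induction l with
  | nil => simp
  | cons c l ih =>
    by_cases h : 'a' ≤ c ∧ c ≤ 'z' <;>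
      simp [chunkB, h, ih]

-- ===== VERDICT (by name: the statement is the Claim_ definition above) =====
theorem change_nums_spec : Claim_equal_change_nums := by
  intro phrase hdom
  unfold Spec_change_nums change_nums change_nums_alt
  rw [foldl_chunkA, List.nil_append]
  rw [List.map_congr_left (fun c _ => chunk_eq c), flatten_chunkB]
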